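-- pv_equiv track=rewrite | github.com/sorgom/sompy | somutil/somtxt.py | commonLen
-- ===== SOURCE A (Python) =====
-- def commonLen(arr:list):
--     """find common begin length of list of iterables"""
--     if not arr: return 0
--     res = len(arr[0])
--     for n, e2 in enumerate(arr[1:]):
--         e1 = arr[n]
--         ln = min(res, len(e2))
--         res = 0
--         for p in range(ln):
--             if e1[p] == e2[p]: res += 1
--             else: break
--     return res
-- ===== SOURCE B (Python) =====
-- def commonLen(arr: list):
--     """find common begin length of list of iterables"""
--     if not arr:
--         return 0
--     res = 0
--     for col in zip(*arr):
--         first = col[0]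
--         if all(c == first for c in col[1:]):
--             res += 1
--         else:
--             break
--     return res
-- ===== Notes on version B (the rewrite author's own statement) =====
-- stated objective: idiomatic
-- what changed: Column-major scan via zip(*arr): walk positions across all elements simultaneously and count leading all-equal columns, instead of A's pairwise consecutive comparisons with a carried bound.
import Mathlib
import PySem

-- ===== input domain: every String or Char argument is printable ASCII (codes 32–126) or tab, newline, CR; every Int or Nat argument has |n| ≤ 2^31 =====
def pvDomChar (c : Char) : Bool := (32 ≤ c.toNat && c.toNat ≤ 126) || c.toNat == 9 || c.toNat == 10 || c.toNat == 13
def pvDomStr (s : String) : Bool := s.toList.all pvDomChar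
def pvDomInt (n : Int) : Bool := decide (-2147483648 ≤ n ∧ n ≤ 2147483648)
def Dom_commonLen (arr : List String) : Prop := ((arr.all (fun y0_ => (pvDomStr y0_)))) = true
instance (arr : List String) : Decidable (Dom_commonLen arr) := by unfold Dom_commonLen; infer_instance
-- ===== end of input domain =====

-- B is the idiomatic column-major rewrite (zip(*arr), count leading all-equal columns)
-- of A's pairwise consecutive scan; same cost, proved to return the same value everywhere.

-- ===== PORT A =====
-- inner loop: `for p in range(ln): if e1[p] == e2[p]: res += 1 else: break`
-- (res starts at 0; counting in Nat — Python's res is a nonnegative int here, cast at the top level)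
def aInner : List Char → List Char → Nat → Nat
  | c1 :: t1, c2 :: t2, n + 1 => if c1 = c2 then aInner t1 t2 n + 1 else 0
  | _, _, _ => 0

-- outer loop: e1 is the previous element (arr[n]), res is carried; ln = min(res, len(e2))
def aLoop : List Char → Nat → List (List Char) → Nat
  | _, res, [] => res
  | e1, res, e2 :: rest => aLoop e2 (aInner e1 e2 (min res e2.length)) rest

def commonLen (arr : List String) : Int :=
  match arr.map String.toList with
  | [] => 0
  | e :: rest => (aLoop e e.length rest : Int)

-- ===== PORT B =====
-- zip(*arr): repeatedly take the heads as a column while every list is nonempty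
def bColsAux : Nat → List (List Char) → List (List Char)
  | 0, _ => []
  | n + 1, ls =>
      if ls.all (fun l => !l.isEmpty)
      then (ls.map (fun l => l.headD default)) :: bColsAux n (ls.map List.tail)
      else []

-- `for col in zip(*arr): first = col[0]; if all(c == first for c in col[1:]): res += 1 else: break`
def bLoop : List (List Char) → Nat
  | [] => 0
  | col :: rest =>
    match col with
    | [] => 0
    | first :: cs => if cs.all (fun c => c == first) then bLoop rest + 1 else 0

def commonLen_alt (arr : List String) : Int :=
  match arr.map String.toList with
  | [] => 0
  | e :: rest => (bLoop (bColsAux e.length (e :: rest)) : Int)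

-- ===== PRECONDITION & SPEC =====
def Spec_commonLen (arr : List String) (out : Int) : Prop := out = commonLen_alt arr
instance (arr : List String) (out : Int) : Decidable (Spec_commonLen arr out) := by unfold Spec_commonLen; infer_instance

-- ===== CLAIM (what is proved, stated in full; the proofs are below) =====
def Claim_equal_commonLen : Prop := ∀ (arr : List String), Dom_commonLen arr → Spec_commonLen arr (commonLen arr)

-- ===== LEMMAS AND PROOFS =====

-- longest common prefix length of two char lists
def lcp2 : List Char → List Char → Nat
  | a :: as_, b :: bs => if a = b then lcp2 as_ bs + 1 else 0
  | _, _ => 0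

-- right fold of min over the lcp2's of e with each element of the list, base r
def G (e : List Char) : List (List Char) → Nat → Nat
  | [], r => r
  | x :: t, r => min (lcp2 e x) (G e t r)

theorem lcp2_le_right : ∀ (a b : List Char), lcp2 a b ≤ b.length
  | [], _ => by simp [lcp2]
  | _ :: _, [] => by simp [lcp2]
  | a :: as_, b :: bs => by
      simp only [lcp2, List.length_cons]
      split_ifs
      · have := lcp2_le_right as_ bs; omega
      · omega

theorem lcp2_trans : ∀ (a b c : List Char),
    min (lcp2 a b) (lcp2 b c) = min (lcp2 a b) (lcp2 a c)
  | [], _, _ => by simp [lcp2]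
  | _ :: _, [], _ => by simp [lcp2]
  | _ :: _, _ :: _, [] => by simp [lcp2]
  | a :: as_, b :: bs, c :: cs => by
      simp only [lcp2]
      by_cases hab : a = b
      · by_cases hbc : b = c
        · have hac : a = c := hab.trans hbc
          simp only [if_pos hab, if_pos hbc, if_pos hac]
          have := lcp2_trans as_ bs cs
          omega
        · have hac : ¬ a = c := fun h => hbc (hab.symm.trans h)
          simp only [if_pos hab, if_neg hbc, if_neg hac]
      · simp only [if_neg hab]
        omega

theorem aInner_eq : ∀ (e1 e2 : List Char) (n : Nat), aInner e1 e2 n = min n (lcp2 e1 e2)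
  | [], e2, n => by cases e2 <;> cases n <;> simp [aInner, lcp2]
  | _ :: _, [], n => by cases n <;> simp [aInner, lcp2]
  | c1 :: t1, c2 :: t2, 0 => by simp [aInner]
  | c1 :: t1, c2 :: t2, n + 1 => by
      simp only [aInner, lcp2]
      split_ifs
      · have := aInner_eq t1 t2 n; omega
      · omega

theorem G_min (e : List Char) (t : List (List Char)) (a b : Nat) :
    G e t (min a b) = min a (G e t b) := by
  induction t with
  | nil => simp [G]
  | cons x t ih => simp only [G, ih]; omega

theorem aLoop_eq_G : ∀ (t : List (List Char)) (e0 e1 : List Char) (r : Nat),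
    aLoop e1 (min r (lcp2 e0 e1)) t = min (lcp2 e0 e1) (G e0 t r)
  | [], e0, e1, r => by simp only [aLoop, G]; omega
  | e2 :: t, e0, e1, r => by
      simp only [aLoop, G, aInner_eq]
      have hstep : min (min (min r (lcp2 e0 e1)) e2.length) (lcp2 e1 e2)
          = min (min r (lcp2 e0 e1)) (lcp2 e0 e2) := by
        have h1 := lcp2_le_right e1 e2
        have h2 := lcp2_trans e0 e1 e2
        omega
      rw [hstep]
      have ih := aLoop_eq_G t e0 e2 (min r (lcp2 e0 e1))
      rw [ih, Nat.min_comm r (lcp2 e0 e1), G_min]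
      omega

theorem aLoop_main (e0 : List Char) (rest : List (List Char)) :
    aLoop e0 e0.length rest = G e0 rest e0.length := by
  cases rest with
  | nil => simp [aLoop, G]
  | cons e1 t =>
      simp only [aLoop, G, aInner_eq]
      have hstep : min (min e0.length e1.length) (lcp2 e0 e1)
          = min e0.length (lcp2 e0 e1) := by
        have := lcp2_le_right e0 e1; omega
      rw [hstep, aLoop_eq_G t e0 e1 e0.length]

theorem G_base_zero (e : List Char) (t : List (List Char)) : G e t 0 = 0 := by
  induction t with
  | nil => rfl
  | cons x t ih => simp [G, ih]

theorem G_nil_mem (e : List Char) : ∀ (t : List (List Char)) (r : Nat),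
    [] ∈ t → G e t r = 0
  | x :: t, r, h => by
      rcases List.mem_cons.mp h with h | h
      · subst h; cases e <;> simp [G, lcp2]
      · simp [G, G_nil_mem e t r h]

theorem G_cons_all (c : Char) (e : List Char) :
    ∀ (t : List (List Char)) (r : Nat),
    (∀ x ∈ t, x ≠ [] ∧ x.headD default = c) →
    G (c :: e) t (r + 1) = G e (t.map List.tail) r + 1
  | [], r, _ => rfl
  | x :: t, r, h => by
      obtain ⟨hne, hhd⟩ := h x List.mem_cons_self
      cases x with
      | nil => exact absurd rfl hne
      | cons y ys =>
          have hy : y = c := by simpa using hhd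
          simp only [G, List.map_cons, List.tail_cons, lcp2, if_pos hy.symm]
          rw [G_cons_all c e t r (fun x hx => h x (List.mem_cons_of_mem _ hx))]
          omega

theorem G_cons_bad (c : Char) (e : List Char) :
    ∀ (t : List (List Char)) (r : Nat) (x : List Char),
    x ∈ t → x ≠ [] → x.headD default ≠ c →
    G (c :: e) t r = 0
  | y :: t, r, x, hmem, hne, hhd => by
      rcases List.mem_cons.mp hmem with h | h
      · subst h
        cases x with
        | nil => exact absurd rfl hne
        | cons z zs =>
            have hzc : ¬ z = c := by simpa using hhd
            simp only [G, lcp2]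
            rw [if_neg (fun hh => hzc hh.symm)]
            simp
      · simp [G, G_cons_bad c e t r x h hne hhd]

theorem bLoop_eq_G : ∀ (e0 : List Char) (rest : List (List Char)),
    bLoop (bColsAux e0.length (e0 :: rest)) = G e0 rest e0.length
  | [], rest => by simp [bColsAux, bLoop, G_base_zero]
  | c :: e0, rest => by
      simp only [List.length_cons, bColsAux]
      by_cases hall : ((c :: e0) :: rest).all (fun l => !l.isEmpty)
      · rw [if_pos hall]
        have hne : ∀ x ∈ rest, x ≠ [] := by
          intro x hx
          have := (List.all_eq_true.mp hall) x (List.mem_cons_of_mem _ hx)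
          simpa [List.isEmpty_iff] using this
        simp only [List.map_cons, List.headD_cons, List.tail_cons, bLoop]
        by_cases hhd : (rest.map (fun l => l.headD default)).all (fun ch => ch == c)
        · rw [if_pos hhd]
          have hall2 : ∀ x ∈ rest, x ≠ [] ∧ x.headD default = c := by
            intro x hx
            refine ⟨hne x hx, ?_⟩
            have := (List.all_eq_true.mp hhd) _ (List.mem_map_of_mem hx)
            simpa using this
          rw [bLoop_eq_G e0 (rest.map List.tail), G_cons_all c e0 rest e0.length hall2]
        · rw [if_neg hhd]
          rw [List.all_eq_true] at hhd
          push Not at hhd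
          obtain ⟨ch, hchm, hch⟩ := hhd
          obtain ⟨x, hxm, hxh⟩ := List.mem_map.mp hchm
          have : x.headD default ≠ c := by
            rw [hxh]; simpa using hch
          rw [G_cons_bad c e0 rest (e0.length + 1) x hxm (hne x hxm) this]
      · rw [if_neg hall]
        rw [List.all_eq_true] at hall
        push Not at hall
        obtain ⟨x, hxm, hx⟩ := hall
        have hx' : x = [] := by
          cases x <;> simp_all
        rcases List.mem_cons.mp hxm with h | h
        · subst hx'; simp at h
        · rw [G_nil_mem (c :: e0) rest (e0.length + 1) (hx' ▸ h)]
          rfl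

-- ===== VERDICT (by name: the statement is the Claim_ definition above) =====
theorem commonLen_spec : Claim_equal_commonLen := by
  intro arr _
  unfold Spec_commonLen commonLen commonLen_alt
  cases h : arr.map String.toList with
  | nil => rfl
  | cons e rest =>
      simp only [aLoop_main, bLoop_eq_G]
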